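-- pv_equiv track=rewrite | github.com/yhLee11/Programmers | challenge1.py | solution
-- ===== SOURCE A (Python) =====
-- def solution(price, money, count):
--     answer = -1
--     for i in range(1,count+1):
--         money-=price*i
--         if money<0:
--             answer=abs(money)
--         else:
--             answer=0
--     return answer
-- ===== SOURCE B (Python) =====
-- def solution(price, money, count):
--     if count < 1:
--         return -1
--     total = price * count * (count + 1) // 2
--     return total - money if total > money else 0
-- ===== Notes on version B (the rewrite author's own statement) =====
-- stated objective: faster
-- what changed: Replaces the O(count) loop that subtracts price*i each iteration with the closed-form arithmetic series price*count*(count+1)//2 and a single shortfall comparison.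
import Mathlib
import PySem

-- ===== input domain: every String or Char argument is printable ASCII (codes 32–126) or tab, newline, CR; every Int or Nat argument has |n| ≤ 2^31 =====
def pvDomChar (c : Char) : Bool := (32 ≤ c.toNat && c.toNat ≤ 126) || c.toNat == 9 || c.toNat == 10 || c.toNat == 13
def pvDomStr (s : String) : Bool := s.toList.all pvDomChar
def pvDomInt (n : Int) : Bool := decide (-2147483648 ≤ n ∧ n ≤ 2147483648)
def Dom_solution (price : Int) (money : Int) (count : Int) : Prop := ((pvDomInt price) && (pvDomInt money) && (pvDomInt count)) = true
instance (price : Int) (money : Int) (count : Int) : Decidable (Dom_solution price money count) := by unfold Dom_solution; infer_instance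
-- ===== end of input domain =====

-- B replaces the O(count) subtraction loop with the closed-form series price*count*(count+1)//2 (O(1)).

-- ===== PORT A =====
-- literal port of A: fold over range(1, count+1), state (money, answer), answer starts at -1
def solution (price : Int) (money : Int) (count : Int) : Int :=
  let st := (PySem.List.pyRange 1 (count + 1) 1).foldl
    (fun (s : Int × Int) i =>
      let m := s.1 - price * i
      (m, if m < 0 then -m else 0))
    (money, -1)
  st.2

-- ===== PORT B =====
-- literal port of Source B: guard, closed-form total with Python '//', shortfall
def solution_alt (price : Int) (money : Int) (count : Int) : Int :=
  if count < 1 then -1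
  else
    let total := PySem.Int.floordiv (price * count * (count + 1)) 2
    if total > money then total - money else 0

-- ===== PRECONDITION & SPEC =====
def Spec_solution (price : Int) (money : Int) (count : Int) (out : Int) : Prop := out = solution_alt price money count
instance (price : Int) (money : Int) (count : Int) (out : Int) : Decidable (Spec_solution price money count out) := by unfold Spec_solution; infer_instance

-- ===== CLAIM (what is proved, stated in full; the proofs are below) =====
def Claim_equal_solution : Prop := ∀ (price : Int) (money : Int) (count : Int), Dom_solution price money count → Spec_solution price money count (solution price money count)

-- ===== LEMMAS AND PROOFS =====

-- Gauss sum 1 + 2 + … + c as Python floor-division (exact: c*(c+1) is even)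
def gsum (c : Int) : Int := PySem.Int.floordiv (c * (c + 1)) 2

lemma two_mul_gsum (c : Int) : 2 * gsum c = c * (c + 1) := by
  have h : (2 : Int) ∣ c * (c + 1) := (Int.even_mul_succ_self c).two_dvd
  obtain ⟨k, hk⟩ := h
  simp [gsum, PySem.Int.floordiv, hk, Int.mul_fdiv_cancel_left _ (by norm_num : (2:Int) ≠ 0)]

lemma gsum_succ (c : Int) : gsum (c + 1) = gsum c + (c + 1) := by
  have h1 := two_mul_gsum c
  have h2 := two_mul_gsum (c + 1)
  have key : 2 * gsum (c + 1) = 2 * (gsum c + (c + 1)) := by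
    rw [h2, show (c + 1) * (c + 1 + 1) = c * (c + 1) + 2 * (c + 1) from by ring, ← h1]; ring
  omega

-- the loop invariant: after the whole range, money has dropped by price * gsum c,
-- and answer is the shortfall of the final money (for c ≥ 1)
lemma loop_eval (price : Int) (c : Int) (hc : 1 ≤ c) : ∀ (m a : Int),
    (PySem.List.pyRange 1 (c + 1) 1).foldl
      (fun (s : Int × Int) i =>
        let m' := s.1 - price * i
        (m', if m' < 0 then -m' else 0))
      (m, a)
    = (m - price * gsum c,
       if m - price * gsum c < 0 then -(m - price * gsum c) else 0) := by
  induction c, hc using Int.le_induction with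
  | base =>
    intro m a
    have h1 : PySem.List.pyRange 1 2 1 = [1] := by decide
    have hg : gsum 1 = 1 := by decide
    simp [h1, hg]
  | succ c hc ih =>
    intro m a
    have hsplit : PySem.List.pyRange 1 (c + 1 + 1) 1
        = PySem.List.pyRange 1 (c + 1) 1 ++ [c + 1] :=
      PySem.List.pyRange_one_succ_right (by omega)
    rw [hsplit, List.foldl_append, ih]
    simp only [List.foldl_cons, List.foldl_nil, gsum_succ]
    ring_nf

theorem solution_spec : Claim_equal_solution := by
  intro price money count _
  unfold Spec_solution solution solution_alt
  by_cases h : count < 1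
  · have hnil : PySem.List.pyRange 1 (count + 1) 1 = [] :=
      PySem.List.pyRange_one_eq_nil (by omega)
    simp [hnil, h]
  · push Not at h
    rw [loop_eval price count h money (-1)]
    simp only [if_neg (by omega : ¬ count < 1)]
    have : PySem.Int.floordiv (price * count * (count + 1)) 2 = price * gsum count := by
      have h1 := two_mul_gsum count
      have h2 : price * count * (count + 1) = 2 * (price * gsum count) := by
        rw [mul_assoc, ← h1]; ring
      simp [PySem.Int.floordiv, h2, Int.mul_fdiv_cancel_left _ (by norm_num : (2:Int) ≠ 0)]
    rw [this]
    split_ifs with h1 h2 h2 <;> omega
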